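-- pv_equiv track=rewrite | github.com/Nicholasmais/optotech | backend/optotech/views/report.py | __count_patient__
-- ===== SOURCE A (Python) =====
-- def __count_patient__(patients):
--     ativo, inativo = 0, 0
--     for patient in patients:
--         if patient.get("ativo"):
--             ativo += 1
--         else:
--             inativo += 1
--     return ativo, inativo
-- ===== SOURCE B (Python) =====
-- def __count_patient__(patients):
--     items = list(patients)
--
--     def go(xs):
--         if not xs:
--             return (0, 0)
--         if len(xs) == 1:
--             return (1, 0) if xs[0].get("ativo") else (0, 1)
--         mid = len(xs) // 2
--         a1, i1 = go(xs[:mid])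
--         a2, i2 = go(xs[mid:])
--         return (a1 + a2, i1 + i2)
--
--     return go(items)
-- ===== Notes on version B (the rewrite author's own statement) =====
-- stated objective: alternative
-- what changed: Replaces the single left-to-right two-counter loop with a divide-and-conquer recursion: the materialized list is split at the midpoint, each half is counted recursively, and the (active, inactive) pairs are added componentwise; correct because the counts are a monoid homomorphism under list concatenation.
import Mathlib
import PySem

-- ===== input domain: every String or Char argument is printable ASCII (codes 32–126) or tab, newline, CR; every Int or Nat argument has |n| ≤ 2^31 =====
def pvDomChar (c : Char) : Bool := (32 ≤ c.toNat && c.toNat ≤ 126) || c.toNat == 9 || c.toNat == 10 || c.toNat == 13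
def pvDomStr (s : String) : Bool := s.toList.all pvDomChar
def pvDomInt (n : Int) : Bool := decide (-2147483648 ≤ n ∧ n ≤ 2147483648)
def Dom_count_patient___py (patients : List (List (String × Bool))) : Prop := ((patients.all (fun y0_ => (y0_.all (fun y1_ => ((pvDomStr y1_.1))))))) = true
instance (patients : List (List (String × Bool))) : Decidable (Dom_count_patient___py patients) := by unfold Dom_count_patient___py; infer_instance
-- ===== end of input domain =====

-- B replaces A's two-counter left-to-right loop by a divide-and-conquer recursion that splits the
-- list at the midpoint and adds the half-counts componentwise (alternative decomposition, not faster).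

-- truthiness of patient.get("ativo"): values are Bool, missing key gives None (falsy)
def pvActive (p : List (String × Bool)) : Bool := (PySem.Dict.mk p).get? "ativo" == some true

-- ===== PORT A =====
def count_patient___py (patients : List (List (String × Bool))) : Int × Int :=
  patients.foldl (fun acc patient =>
    if pvActive patient then (acc.1 + 1, acc.2)
    else (acc.1, acc.2 + 1)) (0, 0)

-- ===== PORT B =====
-- go: xs[:mid] / xs[mid:] with 0 ≤ mid ≤ len are exactly take/drop (PySem.List.slice_to_natCast / slice_from_natCast)
def pvGo : List (List (String × Bool)) → Int × Int
  | [] => (0, 0)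
  | [p] => if pvActive p then (1, 0) else (0, 1)
  | x :: y :: rest =>
    let xs := x :: y :: rest
    let mid := xs.length / 2
    let l := pvGo (xs.take mid)
    let r := pvGo (xs.drop mid)
    (l.1 + r.1, l.2 + r.2)
termination_by xs => xs.length
decreasing_by
  · simp only [List.length_take, List.length_cons]; omega
  · simp only [List.length_drop, List.length_cons]; omega

def count_patient___py_alt (patients : List (List (String × Bool))) : Int × Int :=
  pvGo patients

-- ===== PRECONDITION & SPEC =====
def Spec_count_patient___py (patients : List (List (String × Bool))) (out : Int × Int) : Prop := out = count_patient___py_alt patients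
instance (patients : List (List (String × Bool))) (out : Int × Int) : Decidable (Spec_count_patient___py patients out) := by unfold Spec_count_patient___py; infer_instance

-- ===== CLAIM (what is proved, stated in full; the proofs are below) =====
def Claim_equal_count_patient___py : Prop := ∀ (patients : List (List (String × Bool))), Dom_count_patient___py patients → Spec_count_patient___py patients (count_patient___py patients)

-- ===== LEMMAS AND PROOFS =====
theorem pvGo_eq_countP (xs : List (List (String × Bool))) :
    pvGo xs = ((xs.countP pvActive : Int), (xs.countP (fun p => !pvActive p) : Int)) := by
  fun_induction pvGo xs with
  | case1 => simp
  | case2 p h => simp [h]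
  | case3 p h => simp [h]
  | case4 x y rest zs mid l r ihr ihl =>
    have hc : ∀ q : List (String × Bool) → Bool,
        (x :: y :: rest).countP q
          = ((x :: y :: rest).take mid).countP q + ((x :: y :: rest).drop mid).countP q := by
      intro q
      conv_lhs => rw [← List.take_append_drop mid (x :: y :: rest)]
      rw [List.countP_append]
    simp only [l, r, ihl, ihr, zs, hc, Prod.mk.injEq]
    constructor <;> push_cast <;> ring

theorem count_patient___py_foldl (patients : List (List (String × Bool))) (a b : Int) :
    patients.foldl (fun acc patient =>
      if pvActive patient then (acc.1 + 1, acc.2)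
      else (acc.1, acc.2 + 1)) (a, b)
    = (a + (patients.countP pvActive : Int),
       b + (patients.countP (fun p => !pvActive p) : Int)) := by
  induction patients generalizing a b with
  | nil => simp
  | cons p rest ih =>
    simp only [List.foldl_cons, List.countP_cons]
    by_cases h : pvActive p <;> simp [h, ih, Prod.ext_iff] <;> omega

-- ===== VERDICT (by name: the statement is the Claim_ definition above) =====
theorem count_patient___py_spec : Claim_equal_count_patient___py := by
  intro patients _
  unfold Spec_count_patient___py count_patient___py count_patient___py_alt
  rw [count_patient___py_foldl, pvGo_eq_countP]
  simp
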